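-- pv_equiv track=rewrite | github.com/cosmic1995/Helthcare-Test-AP | services/ingest-api/app/services/document_ai_service.py | _identify_compliance_standards
-- ===== SOURCE A (Python) =====
-- from typing import Dict, List, Optional
--
-- def _identify_compliance_standards(text: str) -> List[str]:
--     """Identify compliance standards mentioned in text."""
--     standards = []
--     text_lower = text.lower()
--
--     standard_mappings = {
--         "iso 13485": "ISO_13485",
--         "iso13485": "ISO_13485",
--         "iec 62304": "IEC_62304",
--         "iec62304": "IEC_62304",
--         "fda": "FDA_QMSR",
--         "qmsr": "FDA_QMSR",
--         "510k": "FDA_QMSR",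
--         "iso 27001": "ISO_27001",
--         "iso27001": "ISO_27001",
--         "part 11": "CFR_PART_11",
--         "21 cfr": "CFR_PART_11",
--         "gdpr": "GDPR",
--         "hipaa": "HIPAA",
--     }
--
--     for keyword, standard in standard_mappings.items():
--         if keyword in text_lower and standard not in standards:
--             standards.append(standard)
--
--     return standards
-- ===== SOURCE B (Python) =====
-- from typing import Dict, List, Optional
--
-- def _identify_compliance_standards(text: str) -> List[str]:
--     """Identify compliance standards mentioned in text."""
--     text_lower = text.lower()
--
--     standard_variants = [
--         ("ISO_13485", ["iso 13485", "iso13485"]),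
--         ("IEC_62304", ["iec 62304", "iec62304"]),
--         ("FDA_QMSR", ["fda", "qmsr", "510k"]),
--         ("ISO_27001", ["iso 27001", "iso27001"]),
--         ("CFR_PART_11", ["part 11", "21 cfr"]),
--         ("GDPR", ["gdpr"]),
--         ("HIPAA", ["hipaa"]),
--     ]
--
--     return [standard for standard, variants in standard_variants
--             if any(v in text_lower for v in variants)]
-- ===== Notes on version B (the rewrite author's own statement) =====
-- stated objective: simpler
-- what changed: Replaces the flat keyword-to-standard loop with its membership-based dedup check by a grouped standard-to-variants table traversed once, appending a standard when any of its variants occurs, so no dedup check on the output list is needed.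
import Mathlib
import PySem

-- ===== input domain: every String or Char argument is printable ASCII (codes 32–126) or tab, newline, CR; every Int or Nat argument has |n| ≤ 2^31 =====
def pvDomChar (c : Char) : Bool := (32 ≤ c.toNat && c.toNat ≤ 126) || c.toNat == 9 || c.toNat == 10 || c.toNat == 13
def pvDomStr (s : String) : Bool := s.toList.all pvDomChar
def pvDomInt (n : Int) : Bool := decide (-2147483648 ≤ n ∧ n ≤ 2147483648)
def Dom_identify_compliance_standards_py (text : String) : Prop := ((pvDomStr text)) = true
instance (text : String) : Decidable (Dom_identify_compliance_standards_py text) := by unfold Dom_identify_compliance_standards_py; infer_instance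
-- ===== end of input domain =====

-- B replaces A's flat keyword loop with per-keyword dedup by a grouped standard->variants
-- table filtered once (objective: simpler); proved to return the same list for every text.


-- ===== PORT A =====
-- the dict literal of A, as an insertion-order association list
def pvStandardMappings : List (String × String) :=
  [("iso 13485", "ISO_13485"), ("iso13485", "ISO_13485"),
   ("iec 62304", "IEC_62304"), ("iec62304", "IEC_62304"),
   ("fda", "FDA_QMSR"), ("qmsr", "FDA_QMSR"), ("510k", "FDA_QMSR"),
   ("iso 27001", "ISO_27001"), ("iso27001", "ISO_27001"),
   ("part 11", "CFR_PART_11"), ("21 cfr", "CFR_PART_11"),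
   ("gdpr", "GDPR"), ("hipaa", "HIPAA")]

def identify_compliance_standards_py (text : String) : List String :=
  let text_lower := PySem.Str.lower text
  pvStandardMappings.foldl
    (fun standards ks =>
      if PySem.Str.isIn ks.1 text_lower = true ∧ ks.2 ∉ standards then
        standards ++ [ks.2]
      else standards) []

-- ===== PORT B =====
-- B's grouped table: each canonical standard with its list of keyword variants
def pvStandardVariants : List (String × List String) :=
  [("ISO_13485", ["iso 13485", "iso13485"]),
   ("IEC_62304", ["iec 62304", "iec62304"]),
   ("FDA_QMSR", ["fda", "qmsr", "510k"]),
   ("ISO_27001", ["iso 27001", "iso27001"]),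
   ("CFR_PART_11", ["part 11", "21 cfr"]),
   ("GDPR", ["gdpr"]),
   ("HIPAA", ["hipaa"])]

def identify_compliance_standards_py_alt (text : String) : List String :=
  let text_lower := PySem.Str.lower text
  (pvStandardVariants.filter
      (fun sv => sv.2.any (fun v => PySem.Str.isIn v text_lower))).map Prod.fst

-- ===== PRECONDITION & SPEC =====
def Spec_identify_compliance_standards_py (text : String) (out : List String) : Prop := out = identify_compliance_standards_py_alt text
instance (text : String) (out : List String) : Decidable (Spec_identify_compliance_standards_py text out) := by unfold Spec_identify_compliance_standards_py; infer_instance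

-- ===== CLAIM (what is proved, stated in full; the proofs are below) =====
def Claim_equal_identify_compliance_standards_py : Prop := ∀ (text : String), Dom_identify_compliance_standards_py text → Spec_identify_compliance_standards_py text (identify_compliance_standards_py text)

-- ===== LEMMAS AND PROOFS =====

-- A's loop step, with the substring test abstracted to cond : String -> Bool
def pvStep (cond : String → Bool) (standards : List String) (ks : String × String) : List String :=
  if cond ks.1 = true ∧ ks.2 ∉ standards then standards ++ [ks.2] else standards

-- running A's loop over one standard's contiguous block of keywords
theorem pv_inner (cond : String → Bool) (s : String) (kws : List String) (acc : List String) :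
    (kws.map (fun k => (k, s))).foldl (pvStep cond) acc
      = if s ∈ acc then acc else (if kws.any cond then acc ++ [s] else acc) := by
  induction kws generalizing acc with
  | nil => by_cases h : s ∈ acc <;> simp [h]
  | cons k rest ih =>
    simp only [List.map_cons, List.foldl_cons, pvStep]
    by_cases hs : s ∈ acc
    · rw [if_neg (by simp [hs]), ih]
      simp [hs]
    · by_cases hk : cond k = true
      · rw [if_pos ⟨hk, hs⟩, ih]
        simp [hs, hk]
      · rw [if_neg (by simp [hk]), ih]
        simp [hs, hk]

-- running A's loop over a grouped table whose standard names are distinct and unseen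
theorem pv_outer (cond : String → Bool) (groups : List (String × List String))
    (acc : List String)
    (hfresh : ∀ g ∈ groups, g.1 ∉ acc)
    (hnodup : (groups.map Prod.fst).Nodup) :
    (groups.flatMap (fun g => g.2.map (fun k => (k, g.1)))).foldl (pvStep cond) acc
      = acc ++ (groups.filter (fun g => g.2.any cond)).map Prod.fst := by
  induction groups generalizing acc with
  | nil => simp
  | cons g rest ih =>
    simp only [List.flatMap_cons, List.foldl_append]
    rw [pv_inner, if_neg (hfresh g (by simp))]
    simp only [List.map_cons, List.nodup_cons] at hnodup
    by_cases hg : g.2.any cond = true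
    · rw [if_pos hg, ih (acc ++ [g.1])
        (by intro x hx
            simp only [List.mem_append, List.mem_singleton]
            rintro (h | h)
            · exact hfresh x (by simp [hx]) h
            · exact hnodup.1 (h ▸ List.mem_map_of_mem hx) )
        hnodup.2]
      simp [hg]
    · rw [if_neg hg, ih acc (fun x hx => hfresh x (by simp [hx])) hnodup.2]
      simp [hg]

-- A's flat keyword table is exactly B's grouped table, flattened
theorem pv_flatten :
    pvStandardMappings
      = pvStandardVariants.flatMap (fun g => g.2.map (fun k => (k, g.1))) := by
  decide

theorem pv_table (cond : String → Bool) :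
    (pvStandardMappings.foldl
      (fun standards ks =>
        if cond ks.1 = true ∧ ks.2 ∉ standards then standards ++ [ks.2] else standards) [])
    = ((pvStandardVariants.filter
        (fun sv => sv.2.any (fun v => cond v))).map Prod.fst) := by
  have h := pv_outer cond pvStandardVariants [] (by simp) (by decide)
  rw [← pv_flatten] at h
  simpa [pvStep] using h

-- ===== VERDICT (by name: the statement is the Claim_ definition above) =====
theorem identify_compliance_standards_py_spec : Claim_equal_identify_compliance_standards_py := by
  intro text _
  unfold Spec_identify_compliance_standards_py identify_compliance_standards_py
    identify_compliance_standards_py_alt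
  exact pv_table (fun v => PySem.Str.isIn v (PySem.Str.lower text))
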